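-- pv_equiv track=rewrite | github.com/ytsaurus/ytsaurus | scripts/gdb_helpers/yt_table_client.py | format_lines
-- ===== SOURCE A (Python) =====
-- def format_lines(lines, compact):
--     if not compact:
--         return "\n".join(lines)
--     else:
--         result_with_spaces = " ".join(lines)
--         # AA section problem :) let's remove all double-spaces
--         result = ""
--         for c in result_with_spaces:
--             if c != " " or len(result) == 0 or result[-1] != " ":
--                 result += c
--         return result
-- ===== SOURCE B (Python) =====
-- def format_lines(lines, compact):
--     if not compact:
--         return "\n".join(lines)
--     joined = " ".join(lines)
--     out = []
--     i = 0
--     n = len(joined)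
--     while i < n:
--         c = joined[i]
--         j = i
--         while j < n and joined[j] == c:
--             j += 1
--         out.append(" " if c == " " else joined[i:j])
--         i = j
--     return "".join(out)
-- ===== Notes on version B (the rewrite author's own statement) =====
-- stated objective: alternative
-- what changed: Compact mode now scans runs of equal consecutive characters (emitting one space per space-run, whole run otherwise) instead of A's char-by-char loop that consults the last emitted character.
import Mathlib
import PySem

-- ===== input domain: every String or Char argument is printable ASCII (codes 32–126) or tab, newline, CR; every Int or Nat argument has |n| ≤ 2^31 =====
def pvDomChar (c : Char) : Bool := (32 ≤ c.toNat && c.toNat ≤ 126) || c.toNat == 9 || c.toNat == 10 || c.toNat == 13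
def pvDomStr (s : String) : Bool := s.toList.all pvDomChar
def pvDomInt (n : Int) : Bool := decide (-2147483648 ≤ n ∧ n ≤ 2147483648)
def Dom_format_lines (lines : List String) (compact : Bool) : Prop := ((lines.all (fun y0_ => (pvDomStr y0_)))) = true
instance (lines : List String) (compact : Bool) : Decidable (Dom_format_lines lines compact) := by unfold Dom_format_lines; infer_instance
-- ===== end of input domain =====

-- B joins the lines the same way but collapses repeated spaces by scanning runs of equal
-- consecutive characters (one space per space-run, the whole run otherwise) instead of A's
-- char-by-char loop that consults the last emitted character; same cost, alternative structure.

-- ===== PORT A =====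
-- A's loop: result += c unless c is a space and result already ends with a space.
def format_lines (lines : List String) (compact : Bool) : String :=
  if !compact then PySem.Str.join "\n" lines
  else
    let result_with_spaces := PySem.Str.join " " lines
    let result : List Char :=
      result_with_spaces.toList.foldl
        (fun result c =>
          if c != ' ' || result.length == 0 || PySem.List.pyGet? result (-1) != some ' '
          then result ++ [c] else result)
        []
    String.mk result

-- ===== PORT B =====
-- B's outer while-loop: take the run of characters equal to the head, emit " " for a space
-- run and the run itself otherwise, continue after the run.
def pvRuns (s : List Char) : List Char :=
  match s with
  | [] => []
  | c :: cs =>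
    (if c == ' ' then [' '] else c :: cs.takeWhile (· == c)) ++ pvRuns (cs.dropWhile (· == c))
termination_by s.length
decreasing_by
  simp only [List.length_cons, Nat.lt_succ_iff]
  exact List.length_dropWhile_le _ _

def format_lines_alt (lines : List String) (compact : Bool) : String :=
  if !compact then PySem.Str.join "\n" lines
  else String.mk (pvRuns (PySem.Str.join " " lines).toList)

-- ===== PRECONDITION & SPEC =====
def Spec_format_lines (lines : List String) (compact : Bool) (out : String) : Prop := out = format_lines_alt lines compact
instance (lines : List String) (compact : Bool) (out : String) : Decidable (Spec_format_lines lines compact out) := by unfold Spec_format_lines; infer_instance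

-- ===== CLAIM (what is proved, stated in full; the proofs are below) =====
def Claim_equal_format_lines : Prop := ∀ (lines : List String) (compact : Bool), Dom_format_lines lines compact → Spec_format_lines lines compact (format_lines lines compact)

-- ===== LEMMAS AND PROOFS =====

-- reference collapse: carries only "was the last emitted char a space"
def specGo : Bool → List Char → List Char
  | _, [] => []
  | b, c :: cs => if c == ' ' && b then specGo b cs else c :: specGo (c == ' ') cs

lemma foldA_eq (cs : List Char) : ∀ acc : List Char,
    cs.foldl (fun result c =>
        if c != ' ' || result.length == 0 || PySem.List.pyGet? result (-1) != some ' '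
        then result ++ [c] else result) acc
      = acc ++ specGo (acc.getLast? == some ' ') cs := by
  induction cs with
  | nil => intro acc; simp [specGo]
  | cons c cs ih =>
    intro acc
    by_cases hc : c = ' '
    · subst hc
      rcases eq_or_ne acc [] with h | h
      · subst h
        simp only [List.foldl_cons]
        rw [ih]
        simp [specGo]
      · by_cases hl : acc.getLast? = some ' '
        · have hcond : (' ' != ' ' || acc.length == 0 || PySem.List.pyGet? acc (-1) != some ' ') = false := by
            simp [PySem.List.pyGet?_neg_one, hl, List.length_eq_zero_iff, h]
          simp only [List.foldl_cons, hcond, Bool.false_eq_true, if_false]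
          rw [ih acc]
          simp [specGo, hl]
        · have hcond : (' ' != ' ' || acc.length == 0 || PySem.List.pyGet? acc (-1) != some ' ') = true := by
            simp [PySem.List.pyGet?_neg_one, hl]
          simp only [List.foldl_cons, hcond, if_true]
          rw [ih (acc ++ [' '])]
          simp [specGo, hl]
    · have hcond : (c != ' ' || acc.length == 0 || PySem.List.pyGet? acc (-1) != some ' ') = true := by
        simp [hc]
      simp only [List.foldl_cons, hcond, if_true]
      rw [ih (acc ++ [c])]
      simp [specGo, hc]

lemma specGo_flag_irrel (xs : List Char) (h : xs.head? ≠ some ' ') (b : Bool) :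
    specGo b xs = specGo false xs := by
  cases xs with
  | nil => rfl
  | cons x xs =>
    simp only [List.head?_cons, ne_eq, Option.some.injEq] at h
    simp [specGo, h]

lemma specGo_nonspace_run (c : Char) (hc : c ≠ ' ') :
    ∀ (r : List Char), (∀ x ∈ r, x = c) → ∀ (b : Bool) (rest : List Char),
      specGo b (c :: (r ++ rest)) = c :: r ++ specGo false rest := by
  intro r
  induction r with
  | nil =>
    intro _ b rest
    have hb : (c == ' ') = false := by simp [hc]
    simp [specGo, hb]
  | cons x r ih =>
    intro hmem b rest
    have hx : x = c := hmem x (by simp)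
    have hb : (c == ' ') = false := by simp [hc]
    have h1 : specGo b (c :: ((x :: r) ++ rest)) = c :: specGo false (c :: (r ++ rest)) := by
      simp [specGo, hb, hx]
    rw [h1, ih (fun y hy => hmem y (by simp [hy])) false rest]
    simp [hx]

lemma specGo_true_spaces :
    ∀ (r : List Char), (∀ x ∈ r, x = ' ') → ∀ (rest : List Char),
      specGo true (r ++ rest) = specGo true rest := by
  intro r
  induction r with
  | nil => intro _ rest; rfl
  | cons x r ih =>
    intro hmem rest
    have hx : x = ' ' := hmem x (by simp)
    have h1 : specGo true ((x :: r) ++ rest) = specGo true (r ++ rest) := by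
      simp [specGo, hx]
    rw [h1, ih (fun y hy => hmem y (by simp [hy])) rest]

lemma specGo_space_run (r : List Char) (hmem : ∀ x ∈ r, x = ' ') (rest : List Char) :
    specGo false (' ' :: (r ++ rest)) = ' ' :: specGo true rest := by
  have h1 : specGo false (' ' :: (r ++ rest)) = ' ' :: specGo true (r ++ rest) := by
    simp [specGo]
  rw [h1, specGo_true_spaces r hmem rest]

lemma pvRuns_eq_specGo : ∀ (n : Nat) (s : List Char), s.length ≤ n → pvRuns s = specGo false s := by
  intro n
  induction n with
  | zero =>
    intro s hs
    have : s = [] := List.eq_nil_of_length_eq_zero (Nat.le_zero.mp hs)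
    subst this; simp [pvRuns, specGo]
  | succ n ih =>
    intro s hs
    cases s with
    | nil => simp [pvRuns, specGo]
    | cons c cs =>
      have hlen : (cs.dropWhile (· == c)).length ≤ n := by
        have := List.length_dropWhile_le (· == c) cs
        simp only [List.length_cons] at hs
        omega
      have hrec := ih (cs.dropWhile (· == c)) hlen
      have hsplit : cs.takeWhile (· == c) ++ cs.dropWhile (· == c) = cs :=
        List.takeWhile_append_dropWhile
      have hmem : ∀ x ∈ cs.takeWhile (· == c), x = c := by
        intro x hx
        simpa using List.mem_takeWhile_imp hx
      have hhead : (cs.dropWhile (· == c)).head? ≠ some c := by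
        have h := List.head?_dropWhile_not (· == c) cs
        intro hcon
        rw [hcon] at h
        simp at h
      rw [pvRuns, hrec]
      conv_rhs => rw [← hsplit]
      by_cases hc : c = ' '
      · subst hc
        rw [specGo_space_run (cs.takeWhile (· == ' ')) hmem (cs.dropWhile (· == ' ')),
            specGo_flag_irrel _ hhead true]
        simp
      · rw [specGo_nonspace_run c hc (cs.takeWhile (· == c)) hmem false (cs.dropWhile (· == c))]
        simp [hc]

-- ===== VERDICT (by name: the statement is the Claim_ definition above) =====
theorem format_lines_spec : Claim_equal_format_lines := by
  intro lines compact _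
  unfold Spec_format_lines format_lines format_lines_alt
  cases compact with
  | false => rfl
  | true =>
    simp only [Bool.not_true, Bool.false_eq_true, if_false]
    rw [pvRuns_eq_specGo (PySem.Str.join " " lines).toList.length _ (Nat.le_refl _)]
    rw [foldA_eq]
    simp
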